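-- pv_equiv track=rewrite | github.com/zhihanxu/DSA_training | company/meta/oa/n2p1.py | check_monotonic_triplets
-- ===== SOURCE A (Python) =====
-- def check_monotonic_triplets(arr):
--     result = []
--     for i in range(len(arr) - 2):
--         if (arr[i] < arr[i + 1] < arr[i + 2]) or (arr[i] > arr[i + 1] > arr[i + 2]):
--             result.append(1)
--         else:
--             result.append(0)
--     return result
-- ===== SOURCE B (Python) =====
-- def check_monotonic_triplets(arr):
--     n = len(arr)
--     signs = []
--     for i in range(n - 1):
--         if arr[i + 1] > arr[i]:
--             signs.append(1)
--         elif arr[i + 1] < arr[i]: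
--             signs.append(-1)
--         else:
--             signs.append(0)
--     return [1 if signs[i] != 0 and signs[i] == signs[i + 1] else 0 for i in range(n - 2)]
-- ===== Notes on version B (the rewrite author's own statement) =====
-- stated objective: alternative
-- what changed: B precomputes a list of adjacent-pair comparison signs and then marks positions where two consecutive signs are equal and nonzero, instead of A's single loop with inline chained triplet comparisons.
import Mathlib
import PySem

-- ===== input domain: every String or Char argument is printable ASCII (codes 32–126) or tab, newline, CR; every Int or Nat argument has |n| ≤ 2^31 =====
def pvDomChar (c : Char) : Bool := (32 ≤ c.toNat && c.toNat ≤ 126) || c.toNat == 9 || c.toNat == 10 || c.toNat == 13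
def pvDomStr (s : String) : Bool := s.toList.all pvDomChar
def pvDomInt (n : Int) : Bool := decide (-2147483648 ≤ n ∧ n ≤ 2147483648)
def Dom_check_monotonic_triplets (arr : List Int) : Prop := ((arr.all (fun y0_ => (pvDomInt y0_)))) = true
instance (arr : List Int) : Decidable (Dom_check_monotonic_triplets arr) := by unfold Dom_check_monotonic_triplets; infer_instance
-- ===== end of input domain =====

-- B replaces A's inline chained triplet comparisons with a precomputed adjacent-pair sign list
-- scanned for equal nonzero consecutive signs (alternative decomposition, same cost).


-- ===== PORT A =====
-- literal port of A: one loop over range(len(arr)-2), appending 1 on a strictly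
-- monotonic triplet, else 0 (indices are always in range, so pyGetD is exact)
def check_monotonic_triplets (arr : List Int) : List Int :=
  (PySem.List.pyRange 0 (PySem.List.len arr - 2) 1).foldl
    (fun result i =>
      if (PySem.List.pyGetD arr i 0 < PySem.List.pyGetD arr (i + 1) 0 ∧
          PySem.List.pyGetD arr (i + 1) 0 < PySem.List.pyGetD arr (i + 2) 0) ∨
         (PySem.List.pyGetD arr i 0 > PySem.List.pyGetD arr (i + 1) 0 ∧
          PySem.List.pyGetD arr (i + 1) 0 > PySem.List.pyGetD arr (i + 2) 0)
      then result ++ [1] else result ++ [0]) []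

-- ===== PORT B =====
-- port of Source B: first build the sign list of adjacent pairs, then scan it
def check_monotonic_triplets_alt (arr : List Int) : List Int :=
  let n := PySem.List.len arr
  let signs := (PySem.List.pyRange 0 (n - 1) 1).foldl
    (fun signs i =>
      if PySem.List.pyGetD arr (i + 1) 0 > PySem.List.pyGetD arr i 0 then signs ++ [1]
      else if PySem.List.pyGetD arr (i + 1) 0 < PySem.List.pyGetD arr i 0 then signs ++ [-1]
      else signs ++ [0]) []
  (PySem.List.pyRange 0 (n - 2) 1).map
    (fun i => if PySem.List.pyGetD signs i 0 ≠ 0 ∧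
                 PySem.List.pyGetD signs i 0 = PySem.List.pyGetD signs (i + 1) 0
              then 1 else 0)

-- ===== PRECONDITION & SPEC =====
def Spec_check_monotonic_triplets (arr : List Int) (out : List Int) : Prop := out = check_monotonic_triplets_alt arr
instance (arr : List Int) (out : List Int) : Decidable (Spec_check_monotonic_triplets arr out) := by unfold Spec_check_monotonic_triplets; infer_instance

-- ===== CLAIM (what is proved, stated in full; the proofs are below) =====
def Claim_equal_check_monotonic_triplets : Prop := ∀ (arr : List Int), Dom_check_monotonic_triplets arr → Spec_check_monotonic_triplets arr (check_monotonic_triplets arr)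

-- ===== LEMMAS AND PROOFS =====

-- A's loop as a map over the index range
theorem portA_eq_map (arr : List Int) :
    check_monotonic_triplets arr =
      (PySem.List.pyRange 0 (PySem.List.len arr - 2) 1).map
        (fun i => if (PySem.List.pyGetD arr i 0 < PySem.List.pyGetD arr (i + 1) 0 ∧
                      PySem.List.pyGetD arr (i + 1) 0 < PySem.List.pyGetD arr (i + 2) 0) ∨
                     (PySem.List.pyGetD arr i 0 > PySem.List.pyGetD arr (i + 1) 0 ∧
                      PySem.List.pyGetD arr (i + 1) 0 > PySem.List.pyGetD arr (i + 2) 0)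
                  then (1 : Int) else 0) := by
  unfold check_monotonic_triplets
  rw [show (fun (result : List Int) i =>
      if (PySem.List.pyGetD arr i 0 < PySem.List.pyGetD arr (i + 1) 0 ∧
          PySem.List.pyGetD arr (i + 1) 0 < PySem.List.pyGetD arr (i + 2) 0) ∨
         (PySem.List.pyGetD arr i 0 > PySem.List.pyGetD arr (i + 1) 0 ∧
          PySem.List.pyGetD arr (i + 1) 0 > PySem.List.pyGetD arr (i + 2) 0)
      then result ++ [1] else result ++ [0]) =
      (fun result i => result ++
        [if (PySem.List.pyGetD arr i 0 < PySem.List.pyGetD arr (i + 1) 0 ∧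
             PySem.List.pyGetD arr (i + 1) 0 < PySem.List.pyGetD arr (i + 2) 0) ∨
            (PySem.List.pyGetD arr i 0 > PySem.List.pyGetD arr (i + 1) 0 ∧
             PySem.List.pyGetD arr (i + 1) 0 > PySem.List.pyGetD arr (i + 2) 0)
         then (1 : Int) else 0]) from by funext r i; split <;> rfl]
  exact (PySem.List.foldl_append_singleton_eq_map _ _ []).trans (List.nil_append _)

-- B's sign loop as a map over the index range
theorem signs_eq_map (arr : List Int) :
    ((PySem.List.pyRange 0 (PySem.List.len arr - 1) 1).foldl
      (fun signs i =>
        if PySem.List.pyGetD arr (i + 1) 0 > PySem.List.pyGetD arr i 0 then signs ++ [1]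
        else if PySem.List.pyGetD arr (i + 1) 0 < PySem.List.pyGetD arr i 0 then signs ++ [-1]
        else signs ++ [0]) []) =
      (PySem.List.pyRange 0 (PySem.List.len arr - 1) 1).map
        (fun i => if PySem.List.pyGetD arr (i + 1) 0 > PySem.List.pyGetD arr i 0 then (1 : Int)
                  else if PySem.List.pyGetD arr (i + 1) 0 < PySem.List.pyGetD arr i 0 then -1
                  else 0) := by
  rw [show (fun (signs : List Int) i =>
      if PySem.List.pyGetD arr (i + 1) 0 > PySem.List.pyGetD arr i 0 then signs ++ [1]
      else if PySem.List.pyGetD arr (i + 1) 0 < PySem.List.pyGetD arr i 0 then signs ++ [-1]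
      else signs ++ [0]) =
      (fun signs i => signs ++
        [if PySem.List.pyGetD arr (i + 1) 0 > PySem.List.pyGetD arr i 0 then (1 : Int)
         else if PySem.List.pyGetD arr (i + 1) 0 < PySem.List.pyGetD arr i 0 then -1
         else 0]) from by funext s i; split <;> [rfl; split <;> rfl]]
  exact (PySem.List.foldl_append_singleton_eq_map _ _ []).trans (List.nil_append _)

-- ===== VERDICT (by name: the statement is the Claim_ definition above) =====
theorem check_monotonic_triplets_spec : Claim_equal_check_monotonic_triplets := by
  intro arr _
  unfold Spec_check_monotonic_triplets check_monotonic_triplets_alt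
  dsimp only
  rw [portA_eq_map, signs_eq_map]
  apply List.map_congr_left
  intro i hi
  have hmem := PySem.List.mem_pyRange_one.mp hi
  have hget : ∀ j : Int, 0 ≤ j → j < PySem.List.len arr - 1 →
      PySem.List.pyGetD
        ((PySem.List.pyRange 0 (PySem.List.len arr - 1) 1).map
          (fun i => if PySem.List.pyGetD arr (i + 1) 0 > PySem.List.pyGetD arr i 0 then (1 : Int)
                    else if PySem.List.pyGetD arr (i + 1) 0 < PySem.List.pyGetD arr i 0 then -1
                    else 0)) j 0 =
        (if PySem.List.pyGetD arr (j + 1) 0 > PySem.List.pyGetD arr j 0 then (1 : Int)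
         else if PySem.List.pyGetD arr (j + 1) 0 < PySem.List.pyGetD arr j 0 then -1
         else 0) := by
    intro j hj0 hj1
    exact PySem.List.pyGetD_map_pyRange_of_nonneg _ _ j 0 hj0 hj1
  rw [hget i (by omega) (by omega), hget (i + 1) (by omega) (by omega)]
  have h21 : i + 1 + 1 = i + 2 := by ring
  rw [h21]
  clear hi hget
  split_ifs <;> first | rfl | omega | tauto
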